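-- pv_equiv track=rewrite | github.com/asobl/lv2-parking-chicago | product/web/scripts/fetch_streets.py | merge_lines
-- ===== SOURCE A (Python) =====
-- def merge_lines(lines):
--     """Merge touching line segments into one continuous LineString."""
--     if not lines:
--         return []
--     if len(lines) == 1:
--         return lines[0]
--
--     # Build a flat list, try to chain segments end-to-end
--     result = list(lines[0])
--     used = {0}
--     for _ in range(len(lines)):
--         best = None
--         for i, seg in enumerate(lines):
--             if i in used:
--                 continue
--             if seg[0] == result[-1]:
--                 best = (i, seg, False)
--                 break
--             if seg[-1] == result[-1]:
--                 best = (i, seg, True)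
--                 break
--         if best is None:
--             break
--         idx, seg, rev = best
--         used.add(idx)
--         result += (list(reversed(seg)) if rev else seg)[1:]
--
--     return result
-- ===== SOURCE B (Python) =====
-- def merge_lines(lines):
--     """Merge touching line segments into one continuous LineString.
--     Alternative: hash-index segments by both endpoints so each step looks
--     candidate segments up directly instead of re-scanning the whole list."""
--     if not lines:
--         return []
--     if len(lines) == 1:
--         return lines[0]
--     by_start = {}
--     by_end = {}
--     for i, seg in enumerate(lines):
--         by_start.setdefault(tuple(seg[0]), []).append(i)
--         by_end.setdefault(tuple(seg[-1]), []).append(i)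
--     result = list(lines[0])
--     used = {0}
--     for _ in range(len(lines)):
--         last = tuple(result[-1])
--         i0 = next((i for i in by_start.get(last, []) if i not in used), None)
--         i1 = next((i for i in by_end.get(last, []) if i not in used), None)
--         if i0 is None and i1 is None:
--             break
--         if i1 is None or (i0 is not None and i0 <= i1):
--             used.add(i0)
--             result += lines[i0][1:]
--         else:
--             used.add(i1)
--             result += list(reversed(lines[i1]))[1:]
--     return result
-- ===== Notes on version B (the rewrite author's own statement) =====
-- stated objective: alternative
-- what changed: B builds two hash indexes (first-endpoint -> segment indices, last-endpoint -> segment indices) once and each chaining step looks the current tip up in them, taking the lowest-index candidate, instead of A's rescan of the whole enumerated segment list per step.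
import Mathlib
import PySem

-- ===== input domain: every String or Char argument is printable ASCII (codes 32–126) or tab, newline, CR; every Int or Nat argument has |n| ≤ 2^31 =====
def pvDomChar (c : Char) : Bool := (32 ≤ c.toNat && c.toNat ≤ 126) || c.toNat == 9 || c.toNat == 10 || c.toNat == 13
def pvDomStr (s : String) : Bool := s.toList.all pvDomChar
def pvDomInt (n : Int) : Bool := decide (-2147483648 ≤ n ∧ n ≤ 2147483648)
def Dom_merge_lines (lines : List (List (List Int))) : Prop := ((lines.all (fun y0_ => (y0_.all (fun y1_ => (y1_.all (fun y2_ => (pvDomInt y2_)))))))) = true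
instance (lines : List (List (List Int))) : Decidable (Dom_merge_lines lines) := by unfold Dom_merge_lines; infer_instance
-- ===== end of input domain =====

-- B replaces A's per-step rescan of all segments by two hash indexes (endpoint → segment
-- indices) built once; each step looks the current tip up and takes the lowest-index candidate.

-- ===== PORT A =====
-- inner scan of A: 'for i, seg in enumerate(lines): …' with the two endpoint tests and break
def mergeScanA (used : PySem.Set Int) (last : List Int) :
    List (Int × List (List Int)) → Option (Int × List (List Int) × Bool)
  | [] => none
  | (i, seg) :: rest =>
    if PySem.Set.contains used i then mergeScanA used last rest
    else if PySem.List.pyGet? seg 0 = some last then some (i, seg, false)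
    else if PySem.List.pyGet? seg (-1) = some last then some (i, seg, true)
    else mergeScanA used last rest

-- outer 'for _ in range(len(lines))' loop of A; 'result[-1]' is exact on Pre_ (result never empty there)
def mergeLoopA (lines : List (List (List Int))) :
    Nat → List (List Int) → PySem.Set Int → List (List Int)
  | 0, result, _ => result
  | k + 1, result, used =>
    match mergeScanA used ((PySem.List.pyGet? result (-1)).getD []) (PySem.List.enumerate lines 0) with
    | none => result
    | some (i, seg, rev) =>
        -- '(list(reversed(seg)) if rev else seg)[1:]' : [1:] on a list is 'drop 1' (exact)
        mergeLoopA lines k (result ++ ((if rev then seg.reverse else seg).drop 1)) (PySem.Set.add used i)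

def merge_lines (lines : List (List (List Int))) : List (List Int) :=
  if lines = [] then []
  else if lines.length = 1 then (PySem.List.pyGet? lines 0).getD []
  else mergeLoopA lines lines.length ((PySem.List.pyGet? lines 0).getD [])
        (PySem.Set.add PySem.Set.empty 0)

-- ===== PORT B =====
-- build the two endpoint indexes: 'by_start.setdefault(seg[0], []).append(i)' etc.
-- 'seg[0]' / 'seg[-1]' are exact on Pre_ (all segments nonempty there)
def mergeIdxB (lines : List (List (List Int))) :
    PySem.Dict (List Int) (List Int) × PySem.Dict (List Int) (List Int) :=
  (PySem.List.enumerate lines 0).foldl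
    (fun d p =>
      (d.1.modify ((PySem.List.pyGet? p.2 0).getD []) [] (fun l => l ++ [p.1]),
       d.2.modify ((PySem.List.pyGet? p.2 (-1)).getD []) [] (fun l => l ++ [p.1])))
    (PySem.Dict.empty, PySem.Dict.empty)

-- one step's appended tail: 'lines[i][1:]' resp. 'list(reversed(lines[i]))[1:]'
def mergeTakeB (lines : List (List (List Int))) (i : Int) (rev : Bool) : List (List Int) :=
  (if rev then ((PySem.List.pyGet? lines i).getD []).reverse
   else (PySem.List.pyGet? lines i).getD []).drop 1

-- outer loop of B: look the tip up in the two indexes, take the lowest-index candidate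
def mergeLoopB (bS bE : PySem.Dict (List Int) (List Int)) (lines : List (List (List Int))) :
    Nat → List (List Int) → PySem.Set Int → List (List Int)
  | 0, result, _ => result
  | k + 1, result, used =>
    let last := (PySem.List.pyGet? result (-1)).getD []
    let i0 := (bS.getD last []).find? (fun i => ! PySem.Set.contains used i)
    let i1 := (bE.getD last []).find? (fun i => ! PySem.Set.contains used i)
    match i0, i1 with
    | none, none => result
    | some a, none =>
        mergeLoopB bS bE lines k (result ++ mergeTakeB lines a false) (PySem.Set.add used a)
    | none, some b =>
        mergeLoopB bS bE lines k (result ++ mergeTakeB lines b true) (PySem.Set.add used b)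
    | some a, some b =>
        if a ≤ b then
          mergeLoopB bS bE lines k (result ++ mergeTakeB lines a false) (PySem.Set.add used a)
        else
          mergeLoopB bS bE lines k (result ++ mergeTakeB lines b true) (PySem.Set.add used b)

def merge_lines_alt (lines : List (List (List Int))) : List (List Int) :=
  if lines = [] then []
  else if lines.length = 1 then (PySem.List.pyGet? lines 0).getD []
  else
    let idx := mergeIdxB lines
    mergeLoopB idx.1 idx.2 lines lines.length ((PySem.List.pyGet? lines 0).getD [])
      (PySem.Set.add PySem.Set.empty 0)

-- ===== PRECONDITION & SPEC =====
-- Pre_ excludes exactly the inputs on which A raises IndexError: two or more segments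
-- with some segment empty (the 'seg[0]' / 'result[-1]' lookups then hit an empty list).
def Pre_merge_lines (lines : List (List (List Int))) : Prop :=
  lines.length ≤ 1 ∨ ∀ seg ∈ lines, seg ≠ []
instance (lines : List (List (List Int))) : Decidable (Pre_merge_lines lines) := by
  unfold Pre_merge_lines; infer_instance

def pvWitness_merge_lines : List (List (List Int)) :=
  [[[0, 0], [1, 1]], [[1, 1], [2, 2]], [[3, 3], [2, 2]]]

def Spec_merge_lines (lines : List (List (List Int))) (out : List (List Int)) : Prop := out = merge_lines_alt lines
instance (lines : List (List (List Int))) (out : List (List Int)) : Decidable (Spec_merge_lines lines out) := by unfold Spec_merge_lines; infer_instance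

-- ===== CLAIM (what is proved, stated in full; the proofs are below) =====
def Claim_equal_merge_lines : Prop := ∀ (lines : List (List (List Int))), Dom_merge_lines lines → Pre_merge_lines lines → Spec_merge_lines lines (merge_lines lines)

-- ===== LEMMAS AND PROOFS =====

-- segment's key under endpoint index j (0 = first point, -1 = last point)
def segKey (j : Int) (seg : List (List Int)) : List Int := (PySem.List.pyGet? seg j).getD []

-- reference bucket: the (index, segment) pairs of e whose j-endpoint equals last
def bucketRef (j : Int) (last : List Int) (e : List (Int × List (List Int))) :
    List (Int × List (List Int)) :=
  e.filterMap (fun q => if segKey j q.2 = last then some q else none)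

-- A's inner scan, expressed through the two reference buckets
def pickRef (used : PySem.Set Int) (last : List Int) (e : List (Int × List (List Int))) :
    Option (Int × List (List Int) × Bool) :=
  match (bucketRef 0 last e).find? (fun q => ! PySem.Set.contains used q.1),
        (bucketRef (-1) last e).find? (fun q => ! PySem.Set.contains used q.1) with
  | none, none => none
  | some a, none => some (a.1, a.2, false)
  | none, some b => some (b.1, b.2, true)
  | some a, some b => if a.1 ≤ b.1 then some (a.1, a.2, false) else some (b.1, b.2, true)

theorem pyGet?_zero (seg : List (List Int)) (h : seg ≠ []) :
    PySem.List.pyGet? seg 0 = some (seg.head h) := by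
  cases seg with
  | nil => exact absurd rfl h
  | cons a t => simp [PySem.List.pyGet?, PySem.List.pyIdx?]

theorem pyGet?_last (seg : List (List Int)) (h : seg ≠ []) :
    PySem.List.pyGet? seg (-1) = some (seg.getLast h) := by
  have hl : 1 ≤ seg.length := List.length_pos_of_ne_nil h
  simp [PySem.List.pyGet?, PySem.List.pyIdx?, hl,
    List.getElem?_eq_getElem (by omega : seg.length - 1 < seg.length), List.getLast_eq_getElem]

theorem cond_zero (seg : List (List Int)) (h : seg ≠ []) (last : List Int) :
    (PySem.List.pyGet? seg 0 = some last) ↔ segKey 0 seg = last := by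
  rw [segKey, pyGet?_zero seg h]; simp

theorem cond_neg_one (seg : List (List Int)) (h : seg ≠ []) (last : List Int) :
    (PySem.List.pyGet? seg (-1) = some last) ↔ segKey (-1) seg = last := by
  rw [segKey, pyGet?_last seg h]; simp

theorem mem_bucketRef {j : Int} {last : List Int} {e : List (Int × List (List Int))}
    {q : Int × List (List Int)} (hq : q ∈ bucketRef j last e) : q ∈ e := by
  rw [bucketRef, List.mem_filterMap] at hq
  obtain ⟨a, ha, hfa⟩ := hq
  by_cases hc : segKey j a.2 = last
  · simp [hc] at hfa; exact hfa ▸ ha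
  · simp [hc] at hfa

theorem bucketRef_cons_pos {j : Int} {last : List Int} {i : Int} {seg : List (List Int)}
    {rest : List (Int × List (List Int))} (h : segKey j seg = last) :
    bucketRef j last ((i, seg) :: rest) = (i, seg) :: bucketRef j last rest := by
  simp [bucketRef, h]

theorem bucketRef_cons_neg {j : Int} {last : List Int} {i : Int} {seg : List (List Int)}
    {rest : List (Int × List (List Int))} (h : ¬ segKey j seg = last) :
    bucketRef j last ((i, seg) :: rest) = bucketRef j last rest := by
  simp [bucketRef, h]

theorem scan_eq (used : PySem.Set Int) (last : List Int) :
    ∀ e : List (Int × List (List Int)), (∀ p ∈ e, p.2 ≠ []) →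
      e.Pairwise (fun p q => p.1 < q.1) →
      mergeScanA used last e = pickRef used last e := by
  intro e
  induction e with
  | nil => intro _ _; rfl
  | cons p rest ih =>
    intro hne hpw
    obtain ⟨i, seg⟩ := p
    have hseg : seg ≠ [] := hne (i, seg) (List.mem_cons_self)
    have hne' : ∀ p ∈ rest, p.2 ≠ [] := fun p hp => hne p (List.mem_cons_of_mem _ hp)
    rw [List.pairwise_cons] at hpw
    have hlt : ∀ q ∈ rest, i < q.1 := fun q hq => hpw.1 q hq
    have ihr := ih hne' hpw.2
    cases hc : PySem.Set.contains used i with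
    | true =>
      -- i already used: the scan skips it, and both find?s reject it
      have hpf : ((fun q : Int × List (List Int) => ! PySem.Set.contains used q.1) (i, seg)) = false := by
        simp only [hc, Bool.not_true]
      have hp : ¬ ((fun q : Int × List (List Int) => ! PySem.Set.contains used q.1) (i, seg)) = true := by
        rw [hpf]; exact Bool.false_ne_true
      have e0 : (bucketRef 0 last ((i, seg) :: rest)).find?
            (fun q => ! PySem.Set.contains used q.1)
          = (bucketRef 0 last rest).find? (fun q => ! PySem.Set.contains used q.1) := by
        by_cases h0 : segKey 0 seg = last
        · rw [bucketRef_cons_pos h0]; exact List.find?_cons_of_neg hp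
        · rw [bucketRef_cons_neg h0]
      have e1 : (bucketRef (-1) last ((i, seg) :: rest)).find?
            (fun q => ! PySem.Set.contains used q.1)
          = (bucketRef (-1) last rest).find? (fun q => ! PySem.Set.contains used q.1) := by
        by_cases h1 : segKey (-1) seg = last
        · rw [bucketRef_cons_pos h1]; exact List.find?_cons_of_neg hp
        · rw [bucketRef_cons_neg h1]
      rw [mergeScanA, if_pos hc, ihr]
      unfold pickRef
      rw [e0, e1]
    | false =>
      have hcne : ¬ PySem.Set.contains used i = true := by rw [hc]; exact Bool.false_ne_true
      have hp : ((fun q : Int × List (List Int) => ! PySem.Set.contains used q.1) (i, seg)) = true := by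
        simp only [hc, Bool.not_false]
      by_cases h0 : PySem.List.pyGet? seg 0 = some last
      · -- match at the first endpoint: A returns (i, seg, false)
        have hk0 : segKey 0 seg = last := (cond_zero seg hseg last).mp h0
        have e0 : (bucketRef 0 last ((i, seg) :: rest)).find?
              (fun q => ! PySem.Set.contains used q.1) = some (i, seg) := by
          rw [bucketRef_cons_pos hk0]; exact List.find?_cons_of_pos hp
        rw [mergeScanA, if_neg hcne, if_pos h0]
        unfold pickRef
        rw [e0]
        by_cases h1 : segKey (-1) seg = last
        · have e1 : (bucketRef (-1) last ((i, seg) :: rest)).find?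
                (fun q => ! PySem.Set.contains used q.1) = some (i, seg) := by
            rw [bucketRef_cons_pos h1]; exact List.find?_cons_of_pos hp
          rw [e1]; simp
        · rw [bucketRef_cons_neg h1]
          cases hb : (bucketRef (-1) last rest).find?
              (fun q => ! PySem.Set.contains used q.1) with
          | none => rfl
          | some b =>
            have hble : i ≤ b.1 :=
              le_of_lt (hlt b (mem_bucketRef (List.mem_of_find?_eq_some hb)))
            simp [hble]
      · by_cases h1 : PySem.List.pyGet? seg (-1) = some last
        · -- match at the second endpoint: A returns (i, seg, true)
          have hk1 : segKey (-1) seg = last := (cond_neg_one seg hseg last).mp h1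
          have hk0 : ¬ segKey 0 seg = last := fun hcc => h0 ((cond_zero seg hseg last).mpr hcc)
          have e1 : (bucketRef (-1) last ((i, seg) :: rest)).find?
                (fun q => ! PySem.Set.contains used q.1) = some (i, seg) := by
            rw [bucketRef_cons_pos hk1]; exact List.find?_cons_of_pos hp
          rw [mergeScanA, if_neg hcne, if_neg h0, if_pos h1]
          unfold pickRef
          rw [e1, bucketRef_cons_neg hk0]
          cases ha : (bucketRef 0 last rest).find?
              (fun q => ! PySem.Set.contains used q.1) with
          | none => rfl
          | some a =>
            have halt : ¬ a.1 ≤ i :=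
              not_le.mpr (hlt a (mem_bucketRef (List.mem_of_find?_eq_some ha)))
            simp [halt]
        · -- no match at i: both sides move on
          have hk0 : ¬ segKey 0 seg = last := fun hcc => h0 ((cond_zero seg hseg last).mpr hcc)
          have hk1 : ¬ segKey (-1) seg = last := fun hcc => h1 ((cond_neg_one seg hseg last).mpr hcc)
          rw [mergeScanA, if_neg hcne, if_neg h0, if_neg h1, ihr]
          unfold pickRef
          rw [bucketRef_cons_neg hk0, bucketRef_cons_neg hk1]

theorem idxFold (last : List Int) :
    ∀ (e : List (Int × List (List Int)))
      (d : PySem.Dict (List Int) (List Int) × PySem.Dict (List Int) (List Int)),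
      ((e.foldl (fun d p =>
          (d.1.modify ((PySem.List.pyGet? p.2 0).getD []) [] (fun l => l ++ [p.1]),
           d.2.modify ((PySem.List.pyGet? p.2 (-1)).getD []) [] (fun l => l ++ [p.1]))) d).1.getD last []
        = d.1.getD last [] ++ (bucketRef 0 last e).map (·.1))
      ∧ ((e.foldl (fun d p =>
          (d.1.modify ((PySem.List.pyGet? p.2 0).getD []) [] (fun l => l ++ [p.1]),
           d.2.modify ((PySem.List.pyGet? p.2 (-1)).getD []) [] (fun l => l ++ [p.1]))) d).2.getD last []
        = d.2.getD last [] ++ (bucketRef (-1) last e).map (·.1)) := by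
  intro e
  induction e with
  | nil => intro d; simp [bucketRef]
  | cons p rest ih =>
    intro d
    obtain ⟨i, seg⟩ := p
    rw [List.foldl_cons]
    constructor
    · rw [(ih _).1]
      by_cases h0 : segKey 0 seg = last
      · rw [bucketRef_cons_pos h0, List.map_cons]
        have hd : (d.1.modify ((PySem.List.pyGet? seg 0).getD []) [] (fun l => l ++ [i])).getD last []
            = d.1.getD last [] ++ [i] := by
          rw [PySem.Dict.getD_modify]
          have h' : last = segKey 0 seg := h0.symm
          simp [segKey] at h'
          simp [h']
        rw [hd]
        simp
      · rw [bucketRef_cons_neg h0]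
        have hd : (d.1.modify ((PySem.List.pyGet? seg 0).getD []) [] (fun l => l ++ [i])).getD last []
            = d.1.getD last [] := by
          rw [PySem.Dict.getD_modify]
          have hne : ¬ last = (PySem.List.pyGet? seg 0).getD [] := by
            intro hcc; exact h0 (by simp [segKey, hcc.symm])
          simp [hne]
        rw [hd]
    · rw [(ih _).2]
      by_cases h1 : segKey (-1) seg = last
      · rw [bucketRef_cons_pos h1, List.map_cons]
        have hd : (d.2.modify ((PySem.List.pyGet? seg (-1)).getD []) [] (fun l => l ++ [i])).getD last []
            = d.2.getD last [] ++ [i] := by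
          rw [PySem.Dict.getD_modify]
          have h' : last = segKey (-1) seg := h1.symm
          simp [segKey] at h'
          simp [h']
        rw [hd]
        simp
      · rw [bucketRef_cons_neg h1]
        have hd : (d.2.modify ((PySem.List.pyGet? seg (-1)).getD []) [] (fun l => l ++ [i])).getD last []
            = d.2.getD last [] := by
          rw [PySem.Dict.getD_modify]
          have hne : ¬ last = (PySem.List.pyGet? seg (-1)).getD [] := by
            intro hcc; exact h1 (by simp [segKey, hcc.symm])
          simp [hne]
        rw [hd]

theorem idxB_fst (lines : List (List (List Int))) (last : List Int) :
    (mergeIdxB lines).1.getD last []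
      = (bucketRef 0 last (PySem.List.enumerate lines 0)).map (·.1) := by
  have h := (idxFold last (PySem.List.enumerate lines 0) (PySem.Dict.empty, PySem.Dict.empty)).1
  rw [mergeIdxB, h]
  simp [pysem]

theorem idxB_snd (lines : List (List (List Int))) (last : List Int) :
    (mergeIdxB lines).2.getD last []
      = (bucketRef (-1) last (PySem.List.enumerate lines 0)).map (·.1) := by
  have h := (idxFold last (PySem.List.enumerate lines 0) (PySem.Dict.empty, PySem.Dict.empty)).2
  rw [mergeIdxB, h]
  simp [pysem]

theorem enum_lookup {lines : List (List (List Int))} {p : Int × List (List Int)}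
    (hp : p ∈ PySem.List.enumerate lines 0) : PySem.List.pyGet? lines p.1 = some p.2 := by
  rw [PySem.List.mem_enumerate_iff] at hp
  obtain ⟨k, hk, rfl⟩ := hp
  simp only [zero_add]
  simp [PySem.List.pyGet?, PySem.List.pyIdx?, hk]

theorem enum_ne {lines : List (List (List Int))} (hne : ∀ seg ∈ lines, seg ≠ [])
    {p : Int × List (List Int)} (hp : p ∈ PySem.List.enumerate lines 0) : p.2 ≠ [] := by
  rw [PySem.List.mem_enumerate_iff] at hp
  obtain ⟨k, hk, rfl⟩ := hp
  exact hne _ (List.getElem_mem hk)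

theorem loop_eq (lines : List (List (List Int))) (hne : ∀ seg ∈ lines, seg ≠ []) :
    ∀ (k : Nat) (result : List (List Int)) (used : PySem.Set Int),
      mergeLoopA lines k result used
        = mergeLoopB (mergeIdxB lines).1 (mergeIdxB lines).2 lines k result used := by
  intro k
  induction k with
  | zero => intro result used; rfl
  | succ k ih =>
    intro result used
    rw [mergeLoopA, mergeLoopB]
    have hscan := scan_eq used ((PySem.List.pyGet? result (-1)).getD [])
      (PySem.List.enumerate lines 0)
      (fun p hp => enum_ne hne hp) (PySem.List.pairwise_lt_enumerate lines 0)
    rw [hscan]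
    set last := (PySem.List.pyGet? result (-1)).getD [] with hlast
    have h0 : ((mergeIdxB lines).1.getD last []).find? (fun i => ! PySem.Set.contains used i)
        = ((bucketRef 0 last (PySem.List.enumerate lines 0)).find?
            (fun q => ! PySem.Set.contains used q.1)).map (·.1) := by
      rw [idxB_fst, List.find?_map]; rfl
    have h1 : ((mergeIdxB lines).2.getD last []).find? (fun i => ! PySem.Set.contains used i)
        = ((bucketRef (-1) last (PySem.List.enumerate lines 0)).find?
            (fun q => ! PySem.Set.contains used q.1)).map (·.1) := by
      rw [idxB_snd, List.find?_map]; rfl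
    rw [pickRef, h0, h1]
    cases ha : (bucketRef 0 last (PySem.List.enumerate lines 0)).find?
        (fun q => ! PySem.Set.contains used q.1) with
    | none =>
      cases hb : (bucketRef (-1) last (PySem.List.enumerate lines 0)).find?
          (fun q => ! PySem.Set.contains used q.1) with
      | none => rfl
      | some b =>
        have hbl : PySem.List.pyGet? lines b.1 = some b.2 :=
          enum_lookup (mem_bucketRef (List.mem_of_find?_eq_some hb))
        simp only [Option.map_none, Option.map_some, mergeTakeB, hbl, Option.getD_some]
        simp only [if_true]
        exact ih _ _
    | some a =>
      have hal : PySem.List.pyGet? lines a.1 = some a.2 :=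
        enum_lookup (mem_bucketRef (List.mem_of_find?_eq_some ha))
      cases hb : (bucketRef (-1) last (PySem.List.enumerate lines 0)).find?
          (fun q => ! PySem.Set.contains used q.1) with
      | none =>
        simp only [Option.map_none, Option.map_some, mergeTakeB, hal, Option.getD_some]
        simp only [Bool.false_eq_true, if_false]
        exact ih _ _
      | some b =>
        have hbl : PySem.List.pyGet? lines b.1 = some b.2 :=
          enum_lookup (mem_bucketRef (List.mem_of_find?_eq_some hb))
        by_cases hab : a.1 ≤ b.1
        · simp only [Option.map_some, if_pos hab, mergeTakeB, hal, Option.getD_some]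
          simp only [Bool.false_eq_true, if_false]
          exact ih _ _
        · simp only [Option.map_some, if_neg hab, mergeTakeB, hbl, Option.getD_some]
          simp only [if_true]
          exact ih _ _

-- ===== VERDICT (by name: the statement is the Claim_ definition above) =====
theorem merge_lines_spec : Claim_equal_merge_lines := by
  intro lines _ hpre
  unfold Spec_merge_lines merge_lines merge_lines_alt
  by_cases hnil : lines = []
  · simp [hnil]
  · rw [if_neg hnil, if_neg hnil]
    by_cases h1 : lines.length = 1
    · rw [if_pos h1, if_pos h1]
    · rw [if_neg h1, if_neg h1]
      have hne : ∀ seg ∈ lines, seg ≠ [] := by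
        rcases hpre with hlen | hok
        · have : lines.length = 0 ∨ lines.length = 1 := by omega
          rcases this with h | h
          · exact absurd (List.length_eq_zero_iff.mp h) hnil
          · exact absurd h h1
        · exact hok
      exact loop_eq lines hne lines.length _ _
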